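-- pv_equiv track=rewrite | github.com/Madjid-CH/aoc2024 | src/day6/day6.py | walk_up
-- ===== SOURCE A (Python) =====
-- def walk_up(grid, agent_position):
--     x, y = agent_position
--     for i in range(x, -1, -1):
--         if grid[i][y] == "#":
--             grid[i + 1][y] = "^"
--             return grid, (i + 1, y)
--         grid[i][y] = "X"
--     return grid, (0, y)
-- ===== SOURCE B (Python) =====
-- def walk_up(grid, agent_position):
--     # snapshot the column, locate the wall with list.index, then one unified paint pass
--     x, y = agent_position
--     column = [grid[i][y] for i in range(x, -1, -1)]
--     idx = column.index("#") if "#" in column else None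
--     stop = x - idx + 1 if idx is not None else 0
--     for i in range(x, stop - 1, -1):
--         grid[i][y] = "X"
--     if stop > 0:
--         grid[stop][y] = "^"
--     return grid, (stop, y)
-- ===== Notes on version B (the rewrite author's own statement) =====
-- stated objective: alternative
-- what changed: Replaces A's fused find-and-mark loop (early return from inside the loop) by a snapshot-then-paint decomposition: B first snapshots the column, locates the wall with list.index, computes the stop row arithmetically, then does one unified paint pass plus the '^' write.
-- outside the precondition, e.g. on walk_up([[], ['#'], ['.']], (2, 0)): A returns ([[], ['#'], ['^']], (2, 0)), B raises IndexError
import Mathlib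
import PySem

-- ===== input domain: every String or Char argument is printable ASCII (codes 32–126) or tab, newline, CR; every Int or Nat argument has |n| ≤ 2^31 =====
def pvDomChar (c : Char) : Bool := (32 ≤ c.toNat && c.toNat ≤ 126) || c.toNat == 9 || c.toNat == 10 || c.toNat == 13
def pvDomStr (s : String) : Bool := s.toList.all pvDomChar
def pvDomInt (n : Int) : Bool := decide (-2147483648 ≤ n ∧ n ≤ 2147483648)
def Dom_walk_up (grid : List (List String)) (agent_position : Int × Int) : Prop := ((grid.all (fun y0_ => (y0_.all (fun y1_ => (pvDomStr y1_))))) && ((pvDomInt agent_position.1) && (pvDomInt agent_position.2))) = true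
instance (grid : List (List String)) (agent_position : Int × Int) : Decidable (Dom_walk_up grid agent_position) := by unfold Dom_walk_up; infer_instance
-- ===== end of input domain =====

-- B replaces A's fused find-and-mark loop by a locate-then-paint decomposition (same cost);
-- both Pythons mutate `grid` in place identically, the equivalence proved is about the returned value.

-- shared Python-indexing helpers: grid[i][y] read and write (total forms; exact under Pre_)
def pvCell (g : List (List String)) (i y : Int) : String :=
  PySem.List.pyGetD (PySem.List.pyGetD g i []) y ""

def pvSet (g : List (List String)) (i y : Int) (v : String) : List (List String) :=
  PySem.List.pySetD g i (PySem.List.pySetD (PySem.List.pyGetD g i []) y v)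

-- ===== PORT A =====
-- the fused loop: for i in range(x, -1, -1): test '#', mark 'X' as it walks, early return on wall
def pvLoopA (y : Int) (g : List (List String)) : List Int → List (List String) × (Int × Int)
  | [] => (g, (0, y))
  | i :: rest =>
    if pvCell g i y = "#" then (pvSet g (i + 1) y "^", (i + 1, y))
    else pvLoopA y (pvSet g i y "X") rest

def walk_up (grid : List (List String)) (agent_position : Int × Int) : List (List String) × (Int × Int) :=
  pvLoopA agent_position.2 grid (PySem.List.pyRange agent_position.1 (-1) (-1))

-- ===== PORT B =====
-- the paint pass: for i in range(x, stop - 1, -1): grid[i][y] = 'X'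
def pvPaint (y : Int) (g : List (List String)) : List Int → List (List String)
  | [] => g
  | i :: rest => pvPaint y (pvSet g i y "X") rest

def walk_up_alt (grid : List (List String)) (agent_position : Int × Int) : List (List String) × (Int × Int) :=
  let x := agent_position.1
  let y := agent_position.2
  let column := (PySem.List.pyRange x (-1) (-1)).map (fun i => pvCell grid i y)
  let stop : Int :=
    match PySem.List.index? column "#" with
    | some k => x - (k : Int) + 1
    | none => 0
  let g2 := pvPaint y grid (PySem.List.pyRange x (stop - 1) (-1))
  if 0 < stop then (pvSet g2 stop y "^", (stop, y)) else (g2, (stop, y))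

-- ===== PRECONDITION & SPEC =====
-- Pre_ excludes the inputs where Python A raises IndexError (row x out of range, column y out of
-- range in a visited row, or a wall at row x itself with no row x+1 to receive '^').
-- It requires column y to be a valid Python index in EVERY row, not only the visited ones: on
-- ragged grids A may still return while an unvisited shorter row violates this (a mild narrowing).
def Pre_walk_up (grid : List (List String)) (agent_position : Int × Int) : Prop :=
  0 ≤ agent_position.1 →
    (agent_position.1 < (grid.length : Int) ∧
     (∀ row ∈ grid, PySem.Raise.InRange row.length agent_position.2) ∧
     (PySem.List.pyGetD (PySem.List.pyGetD grid agent_position.1 []) agent_position.2 "" = "#" →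
        agent_position.1 + 1 < (grid.length : Int)))
instance (grid : List (List String)) (agent_position : Int × Int) : Decidable (Pre_walk_up grid agent_position) := by unfold Pre_walk_up; infer_instance

def pvWitness_walk_up : List (List String) × (Int × Int) :=
  ([[".", "."], ["#", "."], [".", "."]], (2, 0))

def Spec_walk_up (grid : List (List String)) (agent_position : Int × Int) (out : List (List String) × (Int × Int)) : Prop := out = walk_up_alt grid agent_position
instance (grid : List (List String)) (agent_position : Int × Int) (out : List (List String) × (Int × Int)) : Decidable (Spec_walk_up grid agent_position out) := by unfold Spec_walk_up; infer_instance

-- ===== CLAIM (what is proved, stated in full; the proofs are below) =====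
def Claim_equal_walk_up : Prop := ∀ (grid : List (List String)) (agent_position : Int × Int), Dom_walk_up grid agent_position → Pre_walk_up grid agent_position → Spec_walk_up grid agent_position (walk_up grid agent_position)

-- ===== LEMMAS AND PROOFS =====

-- proof-only helper: the first wall index along a list of rows (characterises both ports)
def pvFindWall (g : List (List String)) (y : Int) : List Int → Option Int
  | [] => none
  | i :: rest => if pvCell g i y = "#" then some i else pvFindWall g y rest

-- writing row i does not change a cell read in a different (nonnegative) row j
lemma pvCell_pvSet_ne (g : List (List String)) (i j y y' : Int) (v : String)
    (hij : i ≠ j) (hi : 0 ≤ i) (hj : 0 ≤ j) :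
    pvCell (pvSet g i y v) j y' = pvCell g j y' := by
  unfold pvCell pvSet
  rw [PySem.List.pySetD_of_nonneg _ _ hi, PySem.List.pyGetD_of_nonneg _ _ hj,
      PySem.List.pyGetD_of_nonneg _ _ hj]
  have : i.toNat ≠ j.toNat := by omega
  simp [List.getD, List.getElem?_set_ne this]

lemma pvFindWall_congr (g g' : List (List String)) (y : Int) (L : List Int)
    (h : ∀ j ∈ L, pvCell g' j y = pvCell g j y) :
    pvFindWall g' y L = pvFindWall g y L := by
  induction L with
  | nil => rfl
  | cons i rest ih =>
      simp only [pvFindWall, h i (by simp)]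
      split_ifs with hc
      · rfl
      · exact ih (fun j hj => h j (by simp [hj]))

lemma pvFindWall_mem (g : List (List String)) (y : Int) (L : List Int) (w : Int)
    (h : pvFindWall g y L = some w) : w ∈ L := by
  induction L with
  | nil => simp [pvFindWall] at h
  | cons i rest ih =>
      simp only [pvFindWall] at h
      split_ifs at h with hc
      · simp at h; simp [h]
      · simpa using Or.inr (ih h)

-- key invariant: the fused loop of A equals B's locate-then-paint on a countdown range
lemma pvKey (y : Int) : ∀ (n : Nat) (x : Int), x + 1 = (n : Int) → ∀ (g : List (List String)),
    pvLoopA y g (PySem.List.pyRange x (-1) (-1)) =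
      (match pvFindWall g y (PySem.List.pyRange x (-1) (-1)) with
       | none => (pvPaint y g (PySem.List.pyRange x (-1) (-1)), (0, y))
       | some w => (pvSet (pvPaint y g (PySem.List.pyRange x w (-1))) (w + 1) y "^", (w + 1, y))) := by
  intro n
  induction n with
  | zero =>
      intro x hx g
      have hx' : x = -1 := by omega
      subst hx'
      simp [PySem.List.pyRange_neg_one_eq_nil (by omega : (-1 : Int) ≤ -1), pvLoopA, pvFindWall, pvPaint]
  | succ m ih =>
      intro x hx g
      have hx0 : 0 ≤ x := by omega
      have hcons : PySem.List.pyRange x (-1) (-1) = x :: PySem.List.pyRange (x - 1) (-1) (-1) :=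
        PySem.List.pyRange_neg_one_cons (by omega)
      rw [hcons]
      by_cases hc : pvCell g x y = "#"
      · simp [pvLoopA, pvFindWall, hc, PySem.List.pyRange_neg_one_eq_nil (le_refl x), pvPaint]
      · have hmem : ∀ j ∈ PySem.List.pyRange (x - 1) (-1) (-1), 0 ≤ j ∧ j < x := by
          intro j hj
          rw [PySem.List.mem_pyRange_neg_one] at hj
          omega
        have hcongr : pvFindWall (pvSet g x y "X") y (PySem.List.pyRange (x - 1) (-1) (-1)) =
            pvFindWall g y (PySem.List.pyRange (x - 1) (-1) (-1)) := by
          apply pvFindWall_congr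
          intro j hj
          have hjb := hmem j hj
          exact pvCell_pvSet_ne g x j y y "X" (by omega) hx0 hjb.1
        have ihx := ih (x - 1) (by omega) (pvSet g x y "X")
        simp only [pvLoopA, pvFindWall, hc]
        rw [ihx, hcongr]
        cases hf : pvFindWall g y (PySem.List.pyRange (x - 1) (-1) (-1)) with
        | none => simp [pvPaint]
        | some w =>
            have hwx : w < x := (hmem w (pvFindWall_mem _ _ _ _ hf)).2
            have : PySem.List.pyRange x w (-1) = x :: PySem.List.pyRange (x - 1) w (-1) :=
              PySem.List.pyRange_neg_one_cons (by omega)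
            simp [this, pvPaint]

-- pvFindWall is index? on the snapshotted column, resolved through the index list
lemma pvFindWall_eq_index? (g : List (List String)) (y : Int) :
    ∀ L : List Int,
      pvFindWall g y L =
        (PySem.List.index? (L.map fun i => pvCell g i y) "#").bind (fun k => L[k]?) := by
  intro L
  induction L with
  | nil => simp [pvFindWall, PySem.List.index?]
  | cons i rest ih =>
      by_cases hc : pvCell g i y = "#"
      · rw [pvFindWall, if_pos hc, List.map_cons, hc, PySem.List.index?_cons_self]
        simp
      · rw [pvFindWall, if_neg hc, List.map_cons,
            PySem.List.index?_cons_of_ne _ hc, ih]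
        cases hidx : PySem.List.index? (List.map (fun i => pvCell g i y) rest) "#" with
        | none => simp
        | some k => simp

-- element k of the countdown range [x, x-1, …, 0] is x - k
lemma pyRange_neg_one_getElem? (x : Int) (k : Nat) (hk : k < (x + 1).toNat) :
    (PySem.List.pyRange x (-1) (-1))[k]? = some (x - k) := by
  rw [PySem.List.pyRange_neg_one]
  have h1 : (x - -1).toNat = (x + 1).toNat := by omega
  rw [h1]
  simp [hk]

-- ===== VERDICT (by name: the statement is the Claim_ definition above) =====
theorem walk_up_spec : Claim_equal_walk_up := by
  intro grid ap _hDom _hPre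
  unfold Spec_walk_up walk_up walk_up_alt
  by_cases hx : 0 ≤ ap.1
  · rw [pvKey ap.2 (ap.1 + 1).toNat ap.1 (by omega) grid]
    have hfw := pvFindWall_eq_index? grid ap.2 (PySem.List.pyRange ap.1 (-1) (-1))
    cases hidx : PySem.List.index? ((PySem.List.pyRange ap.1 (-1) (-1)).map fun i => pvCell grid i ap.2) "#" with
    | none =>
        rw [hidx] at hfw
        simp only [Option.bind_none] at hfw
        rw [PySem.List.index?_eq_idxOf?] at hidx
        have h01 : (0 : Int) - 1 = -1 := by norm_num
        simp [hfw, hidx, h01]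
    | some k =>
        have hklen : k < ((PySem.List.pyRange ap.1 (-1) (-1)).map fun i => pvCell grid i ap.2).length :=
          (PySem.List.getElem_of_index?_eq_some hidx).1
        have hklen' : k < (ap.1 + 1).toNat := by
          simpa [PySem.List.length_pyRange_neg_one] using hklen
        have hget := pyRange_neg_one_getElem? ap.1 k hklen'
        rw [hidx] at hfw
        simp only [Option.bind_some] at hfw
        rw [hget] at hfw
        have hstop : (0 : Int) < ap.1 - k + 1 := by omega
        have hs1 : ap.1 - (k : Int) + 1 - 1 = ap.1 - k := by ring
        rw [PySem.List.index?_eq_idxOf?] at hidx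
        simp [hfw, hidx, hstop, hs1]
  · have hnil : PySem.List.pyRange ap.1 (-1) (-1) = [] :=
      PySem.List.pyRange_neg_one_eq_nil (by omega)
    have hnil0 : PySem.List.pyRange ap.1 (0 - 1) (-1) = [] :=
      PySem.List.pyRange_neg_one_eq_nil (by omega)
    simp [hnil, pvLoopA, pvPaint, PySem.List.index?]
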